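-- pv_equiv track=rewrite | github.com/yananfei-Bette/Leetcode | mythicOA.py | isValidIPv4Token
-- ===== SOURCE A (Python) =====
-- def isValidIPv4Token(token):
--     if len(token) > 3 or len(token) == 0:
--         return False
--     if token[0] == "0" and len(token) > 1:
--         return False
--     parsedInt = 0
--     for i in range(len(token)):
--         # print ord(token[i]) - ord("9")
--         if 0 <= ord(token[i]) - ord("0") <= 9:
--             parsedInt *= 10
--             parsedInt += ord(token[i]) - ord("0")
--             # print ord("9") - ord(token[i]), parsedInt
--         else:
--             return False
--     # print "**************"
--     # print parsedInt, token
--     if parsedInt > 255: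
--         return False
--     return True
-- ===== SOURCE B (Python) =====
-- # Valid tokens are exactly the canonical decimal strings of 0..255 (the
-- # leading-zero rule forbids every non-canonical spelling), so validity is a
-- # membership test in a precomputed table instead of parsing.
-- _VALID = frozenset(str(i) for i in range(256))
--
-- def isValidIPv4Token(token):
--     return token in _VALID
-- ===== Notes on version B (the rewrite author's own statement) =====
-- stated objective: alternative
-- what changed: A parses the token (length/leading-zero guards plus a fused ord-arithmetic accumulation loop and a <=255 bound); B does no parsing at all: it tests membership of the token in a precomputed frozenset of the 256 canonical decimal strings str(0)..str(255), which are exactly the tokens A accepts.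
import Mathlib
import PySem

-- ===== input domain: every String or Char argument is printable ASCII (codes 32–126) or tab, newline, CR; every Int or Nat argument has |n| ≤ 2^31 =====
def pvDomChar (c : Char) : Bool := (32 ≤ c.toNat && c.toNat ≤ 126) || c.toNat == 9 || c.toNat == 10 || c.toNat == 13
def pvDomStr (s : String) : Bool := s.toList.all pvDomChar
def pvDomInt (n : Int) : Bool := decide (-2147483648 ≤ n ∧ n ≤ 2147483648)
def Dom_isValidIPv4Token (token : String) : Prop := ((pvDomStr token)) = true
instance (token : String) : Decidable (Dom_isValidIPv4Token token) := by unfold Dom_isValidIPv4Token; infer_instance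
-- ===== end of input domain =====

-- B replaces A's parse-and-bound loop by membership in the precomputed table of the 256 canonical strings str(0)..str(255); same results, a different algorithm.

set_option maxRecDepth 16000
set_option maxHeartbeats 4000000

-- ===== PORT A =====
-- A's for-loop: accumulate the decimal value, early-return (none) on a non-digit.
def pvLoopA : List Char → Int → Option Int
  | [], acc => some acc
  | c :: cs, acc =>
      if 0 ≤ (c.toNat : Int) - 48 ∧ (c.toNat : Int) - 48 ≤ 9 then
        pvLoopA cs (acc * 10 + ((c.toNat : Int) - 48))
      else none

def pvBodyA (cs : List Char) : Bool :=
  if cs.length > 3 ∨ cs.length = 0 then false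
  else if cs.headD ' ' = '0' ∧ cs.length > 1 then false
  else
    match pvLoopA cs 0 with
    | none => false
    | some parsedInt => if parsedInt > 255 then false else true

def isValidIPv4Token (token : String) : Bool := pvBodyA token.toList

-- ===== PORT B =====
-- the module-level table {str(i) for i in range(256)}, as lists of characters
def pvTable : List (List Char) :=
  (PySem.List.pyRange 0 256 1).map (fun n => PySem.Int.toChars n)

def isValidIPv4Token_alt (token : String) : Bool := pvTable.contains token.toList

-- ===== PRECONDITION & SPEC =====
def Spec_isValidIPv4Token (token : String) (out : Bool) : Prop := out = isValidIPv4Token_alt token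
instance (token : String) (out : Bool) : Decidable (Spec_isValidIPv4Token token out) := by unfold Spec_isValidIPv4Token; infer_instance

-- ===== CLAIM (what is proved, stated in full; the proofs are below) =====
def Claim_equal_isValidIPv4Token : Prop := ∀ (token : String), Dom_isValidIPv4Token token → Spec_isValidIPv4Token token (isValidIPv4Token token)

-- ===== LEMMAS AND PROOFS =====

def pvDigits10 : List Char := ['0','1','2','3','4','5','6','7','8','9']

lemma pv_mem_digits10 {c : Char} :
    c ∈ pvDigits10 ↔ (48 ≤ c.toNat ∧ c.toNat ≤ 57) := by
  constructor
  · intro h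
    fin_cases h <;> decide
  · rintro ⟨h1, h2⟩
    have hext : ∀ (d : Char), c.toNat = d.toNat → c = d :=
      fun d h => Char.ext (UInt32.toNat_inj.1 h)
    have hv : c.toNat = 48 ∨ c.toNat = 49 ∨ c.toNat = 50 ∨ c.toNat = 51 ∨ c.toNat = 52 ∨
        c.toNat = 53 ∨ c.toNat = 54 ∨ c.toNat = 55 ∨ c.toNat = 56 ∨ c.toNat = 57 := by omega
    rcases hv with h|h|h|h|h|h|h|h|h|h
    · rw [hext '0' (h.trans (by decide))]; decide
    · rw [hext '1' (h.trans (by decide))]; decide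
    · rw [hext '2' (h.trans (by decide))]; decide
    · rw [hext '3' (h.trans (by decide))]; decide
    · rw [hext '4' (h.trans (by decide))]; decide
    · rw [hext '5' (h.trans (by decide))]; decide
    · rw [hext '6' (h.trans (by decide))]; decide
    · rw [hext '7' (h.trans (by decide))]; decide
    · rw [hext '8' (h.trans (by decide))]; decide
    · rw [hext '9' (h.trans (by decide))]; decide

-- a non-digit anywhere makes A's fused loop bail out with none
lemma pvLoopA_none {cs : List Char} (acc : Int)
    (h : ∃ c ∈ cs, c ∉ pvDigits10) : pvLoopA cs acc = none := by
  induction cs generalizing acc with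
  | nil => simp at h
  | cons a tl ih =>
      by_cases hd : 0 ≤ (a.toNat : Int) - 48 ∧ (a.toNat : Int) - 48 ≤ 9
      · have ha : a ∈ pvDigits10 := pv_mem_digits10.2 (by omega)
        rcases h with ⟨c, hc, hnd⟩
        rcases List.mem_cons.1 hc with rfl | htl
        · exact absurd ha hnd
        · show (if 0 ≤ (a.toNat : Int) - 48 ∧ (a.toNat : Int) - 48 ≤ 9 then
              pvLoopA tl (acc * 10 + ((a.toNat : Int) - 48)) else none) = none
          rw [if_pos hd]
          exact ih _ ⟨c, htl, hnd⟩
      · show (if 0 ≤ (a.toNat : Int) - 48 ∧ (a.toNat : Int) - 48 ≤ 9 then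
            pvLoopA tl (acc * 10 + ((a.toNat : Int) - 48)) else none) = none
        rw [if_neg hd]

-- every table entry is a nonempty all-digit string of length ≤ 3
lemma pvTable_entries :
    (pvTable.all (fun l => decide (1 ≤ l.length ∧ l.length ≤ 3) &&
      l.all (fun c => decide (c ∈ pvDigits10)))) = true := by decide

lemma pv_not_mem_table_of_nondigit {cs : List Char}
    (h : ∃ c ∈ cs, c ∉ pvDigits10) : cs ∉ pvTable := by
  intro hmem
  rcases h with ⟨c, hc, hnd⟩
  have := List.all_eq_true.1 pvTable_entries cs hmem
  simp only [Bool.and_eq_true, List.all_eq_true, decide_eq_true_eq] at this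
  exact hnd (this.2 c hc)

lemma pv_not_mem_table_of_len {cs : List Char}
    (h : cs.length > 3 ∨ cs.length = 0) : cs ∉ pvTable := by
  intro hmem
  have := List.all_eq_true.1 pvTable_entries cs hmem
  simp only [Bool.and_eq_true, decide_eq_true_eq] at this
  omega

-- the all-digit cases, one / two / three characters: checked exhaustively
lemma pv_dig1_all :
    (pvDigits10.all (fun a => pvBodyA [a] == pvTable.contains [a])) = true := by decide
lemma pv_dig2_all :
    (pvDigits10.all (fun a => pvDigits10.all (fun b =>
      pvBodyA [a,b] == pvTable.contains [a,b]))) = true := by decide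
lemma pv_dig3_all :
    (pvDigits10.all (fun a => pvDigits10.all (fun b => pvDigits10.all (fun c =>
      pvBodyA [a,b,c] == pvTable.contains [a,b,c])))) = true := by decide

lemma pvBody_eq (cs : List Char) : pvBodyA cs = pvTable.contains cs := by
  by_cases hlen : cs.length > 3 ∨ cs.length = 0
  · have hB : cs ∉ pvTable := pv_not_mem_table_of_len hlen
    unfold pvBodyA
    rw [if_pos hlen]
    exact ((List.contains_eq_mem cs pvTable).trans (decide_eq_false hB)).symm
  · by_cases hall : ∀ c ∈ cs, c ∈ pvDigits10
    · obtain _ | ⟨a, _ | ⟨b, _ | ⟨c, _ | tl⟩⟩⟩ := cs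
      · simp at hlen
      · exact eq_of_beq (List.all_eq_true.1 pv_dig1_all a (hall a (by simp)))
      · exact eq_of_beq (List.all_eq_true.1
          (List.all_eq_true.1 pv_dig2_all a (hall a (by simp))) b (hall b (by simp)))
      · exact eq_of_beq (List.all_eq_true.1 (List.all_eq_true.1
          (List.all_eq_true.1 pv_dig3_all a (hall a (by simp))) b (hall b (by simp)))
          c (hall c (by simp)))
      · simp at hlen
    · push Not at hall
      have hB : cs ∉ pvTable := pv_not_mem_table_of_nondigit hall
      have hA := pvLoopA_none (cs := cs) 0 hall
      unfold pvBodyA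
      rw [if_neg hlen]
      by_cases hz : cs.headD ' ' = '0' ∧ cs.length > 1
      · rw [if_pos hz]
        exact ((List.contains_eq_mem cs pvTable).trans (decide_eq_false hB)).symm
      · rw [if_neg hz, hA]
        exact ((List.contains_eq_mem cs pvTable).trans (decide_eq_false hB)).symm

-- ===== VERDICT (by name: the statement is the Claim_ definition above) =====
theorem isValidIPv4Token_spec : Claim_equal_isValidIPv4Token := by
  intro token _
  unfold Spec_isValidIPv4Token isValidIPv4Token isValidIPv4Token_alt
  exact pvBody_eq token.toList
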